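-- pv_equiv track=rewrite | github.com/leiYan1225/MyProject_siat | Python/data_structure/Findjob/Toutiao.py | isOne
-- ===== SOURCE A (Python) =====
-- def isOne(str):
--     zhushi = []
--     for i in range(len(str)):
--         flag1 = False
--         flag2 = False
--         if str[i] =='"':
--             flag1 = True
--         for j in range(i+1, len(str)) :
--             if str[j] == '"' and flag1 ==True :
--                 flag1 = False
--                 zhushi.append(str[i])
--                 zhushi.append(str[j])
--         if str[i] =='//':
--             flag2 = True
--             i+=1
--         if str[i] =='//' and flag2==True:
--             flag2= False
--             zhushi.append(i)
--     return zhushi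
-- ===== SOURCE B (Python) =====
-- def isOne(str):
--     # Each double-quote with another double-quote after it contributes one
--     # pair, so the answer is the pair repeated (quote count - 1) times.
--     return ['"', '"'] * (str.count('"') - 1)
-- ===== Notes on version B (the rewrite author's own statement) =====
-- stated objective: faster
-- what changed: Replaced the quadratic nested index scan (plus the dead '//' branches) by a single count of '"' characters and a closed-form repetition of the pair.
import Mathlib
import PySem

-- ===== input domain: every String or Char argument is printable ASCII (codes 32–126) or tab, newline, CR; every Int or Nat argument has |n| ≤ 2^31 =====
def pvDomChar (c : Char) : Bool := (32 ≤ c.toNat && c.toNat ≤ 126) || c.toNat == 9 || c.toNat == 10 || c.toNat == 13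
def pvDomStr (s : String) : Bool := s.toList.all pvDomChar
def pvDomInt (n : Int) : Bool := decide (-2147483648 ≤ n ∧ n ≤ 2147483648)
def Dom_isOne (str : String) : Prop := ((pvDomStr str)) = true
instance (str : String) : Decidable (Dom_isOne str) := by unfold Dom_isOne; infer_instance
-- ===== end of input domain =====

-- B replaces A's quadratic nested index scan by counting '"' characters and
-- repeating the pair ['"','"'] (count - 1) times (faster, asymptotically).

-- ===== PORT A =====
def isOne (str : String) : List String :=
  let cs := str.toList
  let n := cs.length
  (List.range n).foldl (fun zhushi i =>
    -- flag1 = False; if str[i] == '"': flag1 = True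
    let flag1 := cs.getD i ' ' == '"'
    -- for j in range(i+1, len(str)): if str[j] == '"' and flag1 == True: …
    let st := (List.range' (i+1) (n - (i+1))).foldl
      (fun (st : Bool × List String) j =>
        if cs.getD j ' ' == '"' && st.1 then
          (false, st.2 ++ [String.ofList [cs.getD i ' '], String.ofList [cs.getD j ' ']])
        else st)
      (flag1, zhushi)
    let zhushi := st.2
    -- str[i] == '//' compares a one-character string with the two-character "//",
    -- so flag2 stays False and the final append of the int i is unreachable; ported literally.
    let flag2 := [cs.getD i ' '] == "//".toList
    let i' := if flag2 then i + 1 else i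
    if [cs.getD i' ' '] == "//".toList && flag2 then zhushi ++ [PySem.Int.toStr (i' : Int)]
    else zhushi)
    []

-- ===== PORT B =====
def isOne_alt (str : String) : List String :=
  PySem.List.pyRepeat ["\"", "\""] ((PySem.Str.count str "\"" : Int) - 1)

-- ===== PRECONDITION & SPEC =====
def Spec_isOne (str : String) (out : List String) : Prop := out = isOne_alt str
instance (str : String) (out : List String) : Decidable (Spec_isOne str out) := by unfold Spec_isOne; infer_instance

-- ===== CLAIM (what is proved, stated in full; the proofs are below) =====
def Claim_equal_isOne : Prop := ∀ (str : String), Dom_isOne str → Spec_isOne str (isOne str)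

-- ===== LEMMAS AND PROOFS =====

-- str.count('"') for the single-char needle is the char count
theorem count_go_quote (l : List Char) : ∀ (fuel acc : Nat), l.length ≤ fuel →
    PySem.Chars.count.go ['"'] fuel l acc = acc + l.count '"' := by
  induction l with
  | nil => intro fuel acc _; cases fuel <;> simp [PySem.Chars.count.go]
  | cons h t ih =>
    intro fuel acc hle
    cases fuel with
    | zero => simp at hle
    | succ fuel =>
      simp only [List.length_cons] at hle
      by_cases hq : h = '"'
      · subst hq
        rw [show PySem.Chars.count.go ['"'] (fuel+1) ('"' :: t) acc
              = PySem.Chars.count.go ['"'] fuel t (acc+1) by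
            simp [PySem.Chars.count.go, List.isPrefixOf]]
        rw [ih fuel (acc+1) (by omega)]
        simp
        omega
      · have hpf : (['"'].isPrefixOf (h :: t)) = false := by
          simp [List.isPrefixOf]; exact fun he => hq he.symm
        rw [show PySem.Chars.count.go ['"'] (fuel+1) (h :: t) acc
              = PySem.Chars.count.go ['"'] fuel t acc by
            simp [PySem.Chars.count.go, hpf]]
        rw [ih fuel acc (by omega)]
        simp [hq]

theorem str_count_quote (s : String) : PySem.Str.count s "\"" = s.toList.count '"' := by
  have h0 : PySem.Str.count s "\"" = PySem.Chars.count.go ['"'] s.toList.length s.toList 0 := rfl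
  rw [h0, count_go_quote s.toList s.toList.length 0 (le_refl _)]
  omega

-- the per-index contribution of A's outer loop
def contribQ (cs : List Char) (i : Nat) : List String :=
  if cs.getD i ' ' == '"' && (List.range' (i+1) (cs.length - (i+1))).any (fun j => cs.getD j ' ' == '"')
  then ["\"", "\""] else []

-- A's result, recomputed structurally over the character list
def quotePairs : List Char → List String
  | [] => []
  | c :: rest => (if c == '"' && rest.any (· == '"') then ["\"", "\""] else []) ++ quotePairs rest

-- a one-char list never equals "//".toList
theorem one_char_ne_slashes (c : Char) : ([c] == "//".toList) = false := by
  have h : "//".toList = ['/', '/'] := rfl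
  rw [h]
  simp [BEq.beq, List.beq]

-- inner loop with flag already False does nothing
theorem inner_false (cs : List Char) (i : Nat) (js : List Nat) (z : List String) :
    js.foldl (fun (st : Bool × List String) j =>
        if cs.getD j ' ' == '"' && st.1 then
          (false, st.2 ++ [String.ofList [cs.getD i ' '], String.ofList [cs.getD j ' ']])
        else st) (false, z) = (false, z) := by
  induction js with
  | nil => rfl
  | cons j js ih => simpa using ih

-- inner loop with flag True appends the pair at the first later quote
theorem inner_true (cs : List Char) (i : Nat) (hci : cs.getD i ' ' = '"') (js : List Nat) :
    ∀ z : List String,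
    js.foldl (fun (st : Bool × List String) j =>
        if cs.getD j ' ' == '"' && st.1 then
          (false, st.2 ++ [String.ofList [cs.getD i ' '], String.ofList [cs.getD j ' ']])
        else st) (true, z)
    = if js.any (fun j => cs.getD j ' ' == '"') then (false, z ++ ["\"", "\""]) else (true, z) := by
  induction js with
  | nil => intro z; rfl
  | cons j js ih =>
    intro z
    rw [List.foldl_cons]
    by_cases hj : cs.getD j ' ' = '"'
    · have hbq : (cs.getD j ' ' == '"') = true := by rw [hj]; rfl
      have hb : (cs.getD j ' ' == '"' && ((true, z) : Bool × List String).1) = true := by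
        rw [hbq]; rfl
      rw [hb, if_pos rfl, inner_false, List.any_cons, hbq, Bool.true_or, if_pos rfl, hci, hj]
    · have hbq : (cs.getD j ' ' == '"') = false := beq_eq_false_iff_ne.mpr hj
      have hb : (cs.getD j ' ' == '"' && ((true, z) : Bool × List String).1) = false := by
        rw [hbq]; rfl
      rw [hb]
      simp only [Bool.false_eq_true, if_false]
      rw [ih z, List.any_cons, hbq, Bool.false_or]

-- one step of A's outer loop is "append contribQ"
theorem outer_step (cs : List Char) (z : List String) (i : Nat) :
    (let flag1 := cs.getD i ' ' == '"'
     let st := (List.range' (i+1) (cs.length - (i+1))).foldl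
       (fun (st : Bool × List String) j =>
         if cs.getD j ' ' == '"' && st.1 then
           (false, st.2 ++ [String.ofList [cs.getD i ' '], String.ofList [cs.getD j ' ']])
         else st)
       (flag1, z)
     let zhushi := st.2
     let flag2 := [cs.getD i ' '] == "//".toList
     let i' := if flag2 then i + 1 else i
     if [cs.getD i' ' '] == "//".toList && flag2 then zhushi ++ [PySem.Int.toStr (i' : Int)]
     else zhushi)
    = z ++ contribQ cs i := by
  simp only [one_char_ne_slashes, Bool.and_false, if_false, Bool.false_eq_true]
  by_cases hci : cs.getD i ' ' = '"'
  · have hbq : (cs.getD i ' ' == '"') = true := by rw [hci]; rfl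
    rw [hbq, inner_true cs i hci]
    unfold contribQ
    rw [hbq, Bool.true_and]
    by_cases h : (List.range' (i+1) (cs.length - (i+1))).any (fun j => cs.getD j ' ' == '"') = true
    · rw [h]
      simp
    · rw [Bool.not_eq_true] at h
      rw [h]
      simp
  · have hbq : (cs.getD i ' ' == '"') = false := beq_eq_false_iff_ne.mpr hci
    rw [hbq, inner_false]
    unfold contribQ
    rw [hbq, Bool.false_and]
    simp

-- range-index scan for a later quote = any over the tail
theorem any_range_getD (cs : List Char) (a : Char) :
    (List.range cs.length).any (fun t => cs.getD t ' ' == a) = cs.any (· == a) := by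
  induction cs with
  | nil => rfl
  | cons c rest ih =>
    rw [List.length_cons, List.range_succ_eq_map]
    simp only [List.any_cons, List.any_map]
    rw [show ((fun t => (c :: rest).getD t ' ' == a) ∘ Nat.succ)
          = (fun t => rest.getD t ' ' == a) by funext t; simp]
    rw [ih]
    simp

theorem contribQ_succ (c : Char) (cs : List Char) (i : Nat) :
    contribQ (c :: cs) (i + 1) = contribQ cs i := by
  unfold contribQ
  rw [List.getD_cons_succ]
  congr 2
  rw [show (c :: cs).length - (i+1+1) = cs.length - (i+1) by simp]
  rw [List.range'_eq_map_range, List.range'_eq_map_range]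
  simp only [List.any_map]
  congr 1
  apply PySem.List.any_congr_mem
  intro t _
  simp only [Function.comp_apply]
  rw [show i + 1 + 1 + t = (i + 1 + t) + 1 by omega, List.getD_cons_succ]

theorem contribQ_zero (c : Char) (cs : List Char) :
    contribQ (c :: cs) 0 = (if c == '"' && cs.any (· == '"') then ["\"", "\""] else []) := by
  unfold contribQ
  rw [List.getD_cons_zero]
  congr 2
  rw [show (c :: cs).length - (0+1) = cs.length by simp]
  rw [List.range'_eq_map_range]
  simp only [List.any_map]
  rw [show ((fun j => (c :: cs).getD j ' ' == '"') ∘ (fun x => 0 + 1 + x))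
        = (fun t => cs.getD t ' ' == '"') by
      funext t; simp only [Function.comp_apply]
      rw [show 0 + 1 + t = t + 1 by omega, List.getD_cons_succ]]
  congr 1
  exact any_range_getD cs '"'

theorem flatMap_contrib (cs : List Char) :
    (List.range cs.length).flatMap (contribQ cs) = quotePairs cs := by
  induction cs with
  | nil => rfl
  | cons c rest ih =>
    rw [List.length_cons, List.range_succ_eq_map]
    rw [List.flatMap_cons, List.flatMap_map]
    rw [show (fun a => contribQ (c :: rest) a.succ) = contribQ rest by
      funext i; exact contribQ_succ c rest i]
    rw [ih, contribQ_zero]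
    rfl

theorem quotePairs_count (cs : List Char) :
    quotePairs cs = (List.replicate (cs.count '"' - 1) (["\"", "\""] : List String)).flatten := by
  induction cs with
  | nil => rfl
  | cons c rest ih =>
    by_cases hc : c = '"'
    · subst hc
      rw [List.count_cons_self]
      by_cases h : '"' ∈ rest
      · have hpos : 0 < rest.count '"' := List.count_pos_iff.mpr h
        have hany : rest.any (· == '"') = true := by
          simp only [List.any_eq_true, beq_iff_eq]; exact ⟨'"', h, rfl⟩
        unfold quotePairs
        rw [hany, ih]
        simp only [beq_self_eq_true, Bool.true_and, if_true]
        rw [show rest.count '"' + 1 - 1 = (rest.count '"' - 1) + 1 by omega]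
        rw [List.replicate_succ, List.flatten_cons]
      · have hz : rest.count '"' = 0 := by
          simp [List.count_eq_zero]; intro hmem; exact h hmem
        have hany : rest.any (· == '"') = false := by
          simp only [List.any_eq_false]; intro x hx
          simp only [beq_iff_eq]; intro he; exact h (he ▸ hx)
        unfold quotePairs
        rw [hany, ih, hz]
        simp
    · have hcb : (c == '"') = false := by simp [hc]
      unfold quotePairs
      rw [hcb, ih, List.count_cons_of_ne hc]
      simp

-- ===== VERDICT (by name: the statement is the Claim_ definition above) =====
theorem isOne_spec : Claim_equal_isOne := by
  intro str _
  unfold Spec_isOne isOne isOne_alt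
  have h1 := PySem.List.foldl_congr_mem (List.range str.toList.length)
    (fun zhushi i =>
      let flag1 := str.toList.getD i ' ' == '"'
      let st := (List.range' (i+1) (str.toList.length - (i+1))).foldl
        (fun (st : Bool × List String) j =>
          if str.toList.getD j ' ' == '"' && st.1 then
            (false, st.2 ++ [String.ofList [str.toList.getD i ' '], String.ofList [str.toList.getD j ' ']])
          else st)
        (flag1, zhushi)
      let zhushi := st.2
      let flag2 := [str.toList.getD i ' '] == "//".toList
      let i' := if flag2 then i + 1 else i
      if [str.toList.getD i' ' '] == "//".toList && flag2 then zhushi ++ [PySem.Int.toStr (i' : Int)]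
      else zhushi)
    (fun z i => z ++ contribQ str.toList i) []
    (fun acc x _ => outer_step str.toList acc x)
  refine Eq.trans h1 ?_
  rw [PySem.List.foldl_append_eq_flatMap, List.nil_append, flatMap_contrib,
    quotePairs_count, str_count_quote]
  rw [PySem.List.pyRepeat]
  rw [show ((str.toList.count '"' : Int) - 1).toNat = str.toList.count '"' - 1 by omega]
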